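-- pv_equiv track=rewrite | github.com/SanniSys/AMPContest3 | B_Bracelets2P/main.py | solve_bracelet_case
-- ===== SOURCE A (Python) =====
-- def solve_bracelet_case(s1, s2):
--     # optimize strings
--     set_a = set(s1)
--     set_b = set(s2)
--     common_alphabet = set_a & set_b
--     if not common_alphabet:
--         return 0
--     brace1 = ''.join(c for c in s1 if c in common_alphabet)
--     brace2 = ''.join(c for c in s2 if c in common_alphabet)
--     if not brace1 or not brace2:
--         return 0
--     if len(brace2) < len(brace1):
--         brace1, brace2 = brace2, brace1
--     # find the maximum common length
--     max_len = 0
--     for variation in get_all_variations(brace1):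
--         local_len = edit_dist_delete_only(variation,brace2)
--         max_len = max(max_len, local_len)
--     return max_len
--
-- def get_all_variations(s):
--     variants = []
--     n = len(s)
--     for i in range(n):
--         rotated = s[i:] + s[:i]
--         variants.append(rotated)
--         variants.append(rotated[::-1])  # Auch umgekehrt
--
--     return variants
--
-- def edit_dist_delete_only(s,t):
--     n = len(s)
--     m = len(t)
--     # initialize table D for edit distances
--     D = [[0] * (m + 1) for _ in range(n + 1)]
--     # Base cases
--     """
--     # DANG Zu langsam
--     for i in range(n + 1):
--         D[i][0] = i  # Lösche alle i Zeichen aus s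
--     for j in range(m + 1):
--         D[0][j] = j  # Lösche alle j Zeichen aus t
--     # Fill D, only delete operations!
--     for i in range(1, n + 1):
--         for j in range(1, m + 1):
--             if s[i - 1] == t[j - 1]:
--                 D[i][j] = D[i - 1][j - 1]  # Keine Operation nötig
--             else:
--                 D[i][j] = min(
--                     D[i - 1][j] + 1,  # Lösche aus s
--                     D[i][j - 1] + 1  # Lösche aus t
--                 )
--
--     total_deletions = D[n][m]
--     lcs_length = (n + m - total_deletions) // 2
--     return lcs_length
--     """
--     #--- test obs reicht ---
--     # longest common subsequence
--     # Use only two rows for space optimization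
--     prev = [0] * (m + 1)
--     curr = [0] * (m + 1)
--
--     for i in range(1, n + 1):
--         for j in range(1, m + 1):
--             if s[i - 1] == t[j - 1]:
--                 curr[j] = prev[j - 1] + 1
--             else:
--                 curr[j] = max(prev[j], curr[j - 1])
--         prev, curr = curr, prev
--
--     return prev[m]
-- ===== SOURCE B (Python) =====
-- def solve_bracelet_case(s1, s2):
--     # keep only the characters each string shares with the other
--     a = [c for c in s1 if c in s2]
--     b = [c for c in s2 if c in s1]
--     if not a or not b:
--         return 0
--     if len(b) < len(a):
--         a, b = b, a
--     n = len(a)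
--     d = a + a                # rotations of a are windows of the doubled list
--     rd = a[::-1] * 2         # rotations of reversed a = reversals of rotations of a
--     best = 0
--     for i in range(n):
--         best = max(best, _lcs_memo(d[i:i + n], b), _lcs_memo(rd[i:i + n], b))
--     return best
--
--
-- def _lcs_memo(s, t):
--     # top-down memoized recursion on prefix lengths
--     memo = {}
--
--     def go(i, j):
--         if i == 0 or j == 0:
--             return 0
--         key = (i, j)
--         if key in memo:
--             return memo[key]
--         if s[i - 1] == t[j - 1]:
--             r = go(i - 1, j - 1) + 1
--         else:
--             r = max(go(i - 1, j), go(i, j - 1))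
--         memo[key] = r
--         return r
--
--     return go(len(s), len(t))
-- ===== Notes on version B (the rewrite author's own statement) =====
-- stated objective: alternative
-- what changed: B computes each LCS by top-down memoized recursion on prefix lengths (a dict keyed by (i,j)) instead of A's bottom-up two-row iterative DP, filters each string by direct membership in the other instead of building set intersections, and takes rotations as windows of the doubled filtered string and the reflected variants as windows of the doubled reversed string instead of reversing every rotation.
import Mathlib
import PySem

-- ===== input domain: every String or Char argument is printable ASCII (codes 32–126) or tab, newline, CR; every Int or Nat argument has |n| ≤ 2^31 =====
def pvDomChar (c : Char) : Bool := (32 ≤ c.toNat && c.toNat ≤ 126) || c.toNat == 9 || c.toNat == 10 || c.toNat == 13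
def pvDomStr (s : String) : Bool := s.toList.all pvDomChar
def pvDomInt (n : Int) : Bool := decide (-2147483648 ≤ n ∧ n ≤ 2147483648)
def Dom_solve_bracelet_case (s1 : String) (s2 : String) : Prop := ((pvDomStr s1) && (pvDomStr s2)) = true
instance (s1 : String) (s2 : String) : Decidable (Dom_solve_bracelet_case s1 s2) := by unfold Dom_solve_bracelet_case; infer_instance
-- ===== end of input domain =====

-- B re-implements A (max LCS over all rotations and reflections of the common-alphabet filtrates): it computes
-- each LCS by top-down memoized recursion on prefix lengths (a dict keyed by (i,j)) instead of A's bottom-up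
-- two-row iterative DP, filters by direct membership instead of set intersections, and takes rotations as
-- windows of the doubled list (reflections as windows of the doubled reversed list) instead of reversing every
-- rotation. Objective: alternative (same asymptotic cost).

-- ===== PORT A =====
-- get_all_variations(s): every rotation followed by its reversal, in order
def pvVariationsA (s : List Char) : List (List Char) :=
  (PySem.List.pyRange 0 (s.length : Int)).foldl (fun variants i =>
    let rotated := PySem.List.slice s (some i) none ++ PySem.List.slice s none (some i)
    (variants ++ [rotated]) ++
      [(PySem.List.slice? rotated none none (-1)).getD []])   -- rotated[::-1]; step -1 never yields none
    []

-- edit_dist_delete_only(s, t): the live two-row LCS loop of A (the big commented-out block in A is dead code)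
def pvEditDistA (s t : List Char) : Int :=
  let n : Int := s.length
  let m : Int := t.length
  let prev : List Int := List.replicate (t.length + 1) 0
  let curr : List Int := List.replicate (t.length + 1) 0
  let res := (PySem.List.pyRange 1 (n + 1)).foldl (fun (pc : List Int × List Int) i =>
      let curr' := (PySem.List.pyRange 1 (m + 1)).foldl (fun cu j =>
          if PySem.List.pyGetD s (i - 1) ' ' = PySem.List.pyGetD t (j - 1) ' ' then
            PySem.List.pySetD cu j (PySem.List.pyGetD pc.1 (j - 1) 0 + 1)
          else
            PySem.List.pySetD cu j (max (PySem.List.pyGetD pc.1 j 0) (PySem.List.pyGetD cu (j - 1) 0)))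
        pc.2
      (curr', pc.1))
    (prev, curr)
  PySem.List.pyGetD res.1 m 0   -- return prev[m] (after the final swap, res.1 is prev)

def solve_bracelet_case (s1 : String) (s2 : String) : Int :=
  let set_a := PySem.Set.ofList s1.toList
  let set_b := PySem.Set.ofList s2.toList
  let common := PySem.Set.inter set_a set_b
  if common = [] then 0 else
  let brace1 := s1.toList.filter (fun c => PySem.Set.contains common c)
  let brace2 := s2.toList.filter (fun c => PySem.Set.contains common c)
  if brace1 = [] ∨ brace2 = [] then 0 else
  let p := if brace2.length < brace1.length then (brace2, brace1) else (brace1, brace2)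
  (pvVariationsA p.1).foldl (fun max_len v => max max_len (pvEditDistA v p.2)) 0

-- ===== PORT B =====
-- go(i, j) of _lcs_memo: top-down recursion on prefix lengths, threading the memo dict;
-- Python's `if key in memo: return memo[key]` is rendered as the match on `get?` (contains = isSome get?);
-- s[i-1] at the Lean pattern i+1 is index (i+1)-1 = i, written (i : Int)
def pvGo (s t : List Char) : Nat → Nat → PySem.Dict (Int × Int) Int → Int × PySem.Dict (Int × Int) Int
  | 0, _, memo => (0, memo)
  | _ + 1, 0, memo => (0, memo)
  | i + 1, j + 1, memo =>
      let key : Int × Int := (((i + 1 : Nat) : Int), ((j + 1 : Nat) : Int))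
      match PySem.Dict.get? memo key with
      | some v => (v, memo)
      | none =>
          if PySem.List.pyGetD s ((i : Nat) : Int) ' ' = PySem.List.pyGetD t ((j : Nat) : Int) ' ' then
            let p := pvGo s t i j memo
            (p.1 + 1, PySem.Dict.insert p.2 key (p.1 + 1))
          else
            let p1 := pvGo s t i (j + 1) memo
            let p2 := pvGo s t (i + 1) j p1.2
            (max p1.1 p2.1, PySem.Dict.insert p2.2 key (max p1.1 p2.1))
  termination_by i j _ => i + j

-- _lcs_memo(s, t): fresh memo, answer is go(len(s), len(t))
def pvLcsMemo (s t : List Char) : Int :=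
  (pvGo s t s.length t.length PySem.Dict.empty).1

def solve_bracelet_case_alt (s1 : String) (s2 : String) : Int :=
  let a := s1.toList.filter (fun c => PySem.Chars.isIn [c] s2.toList)
  let b := s2.toList.filter (fun c => PySem.Chars.isIn [c] s1.toList)
  if a = [] ∨ b = [] then 0 else
  let p := if b.length < a.length then (b, a) else (a, b)
  let n : Int := p.1.length
  let d := p.1 ++ p.1
  let r := (PySem.List.slice? p.1 none none (-1)).getD []   -- a[::-1]
  let rd := r ++ r                                          -- r * 2
  (PySem.List.pyRange 0 n).foldl (fun best i =>
    max (max best (pvLcsMemo (PySem.List.slice d (some i) (some (i + n))) p.2))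
        (pvLcsMemo (PySem.List.slice rd (some i) (some (i + n))) p.2)) 0

-- ===== PRECONDITION & SPEC =====
def Spec_solve_bracelet_case (s1 : String) (s2 : String) (out : Int) : Prop := out = solve_bracelet_case_alt s1 s2
instance (s1 : String) (s2 : String) (out : Int) : Decidable (Spec_solve_bracelet_case s1 s2 out) := by unfold Spec_solve_bracelet_case; infer_instance

-- ===== CLAIM (what is proved, stated in full; the proofs are below) =====
def Claim_equal_solve_bracelet_case : Prop := ∀ (s1 : String) (s2 : String), Dom_solve_bracelet_case s1 s2 → Spec_solve_bracelet_case s1 s2 (solve_bracelet_case s1 s2)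

-- ===== LEMMAS AND PROOFS =====

-- the common mathematical reference point: L(i, j) = LCS length of s[:i] and t[:j], by the textbook recurrence
def pvL (s t : List Char) : Nat → Nat → Int
  | 0, _ => 0
  | _ + 1, 0 => 0
  | i + 1, j + 1 =>
      if s.getD i ' ' = t.getD j ' ' then pvL s t i j + 1
      else max (pvL s t i (j + 1)) (pvL s t (i + 1) j)
  termination_by i j => i + j

-- intermediate row shape for A's inner loop (proof-layer only)
def pvRowStep (c : Char) : List Char → List Int → Int → List Int
  | [], _, _ => []
  | d :: trest, row, last =>
      let v := if c = d then row.headD 0 + 1 else max (row.tail.headD 0) last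
      v :: pvRowStep c trest row.tail v

def pvLcs (s t : List Char) : Int :=
  let row := s.foldl (fun row c => 0 :: pvRowStep c t row 0) (List.replicate (t.length + 1) (0 : Int))
  PySem.List.pyGetD row (-1) 0

theorem pv_foldl_range_getD {α β : Type} (xs : List α) (d : α) (f : β → α → β) (init : β) :
    (List.range xs.length).foldl (fun acc k => f acc (xs.getD k d)) init = xs.foldl f init := by
  induction xs using List.reverseRecOn generalizing init with
  | nil => simp
  | append_singleton ys y ih =>
      rw [List.length_append, List.length_cons, List.length_nil, Nat.add_zero, List.range_succ,
        List.foldl_append, List.foldl_append]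
      rw [PySem.List.foldl_congr_mem _ _ (fun acc k => f acc (ys.getD k d)) init ?_, ih]
      · simp
      · intro acc k hk
        simp only [List.mem_range] at hk
        rw [List.getD_append _ _ _ _ hk]

theorem pv_foldl_shift {β : Type} (xs : List Char) (dflt : Char) (f : β → Char → β) (init : β) :
    (PySem.List.pyRange 1 ((xs.length : Int) + 1)).foldl
        (fun acc i => f acc (PySem.List.pyGetD xs (i - 1) dflt)) init
      = xs.foldl f init := by
  rw [PySem.List.pyRange_one, List.foldl_map]
  have h1 : ((xs.length : Int) + 1 - 1).toNat = xs.length := by omega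
  rw [h1]
  rw [PySem.List.foldl_congr_mem _ _ (fun acc k => f acc (xs.getD k dflt)) init ?_]
  · exact pv_foldl_range_getD xs dflt f init
  · intro acc k hk
    have h : (1 : Int) + (k : Int) - 1 = (k : Int) := by omega
    rw [h, PySem.List.pyGetD_natCast]

theorem pv_getD_headD_drop {α : Type} (l : List α) (p : Nat) (d : α) :
    l.getD p d = (l.drop p).headD d := by
  rw [List.getD_eq_getElem?_getD, List.headD_eq_head?_getD, List.head?_drop]

theorem pv_inner (c : Char) (t : List Char) (prev : List Int) :
    ∀ (trem : List Char) (p : Nat) (done rest : List Int) (last : Int),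
      t.drop p = trem → done.length = p + 1 → rest.length = t.length - p → done.getD p 0 = last →
      (PySem.List.pyRange ((p : Int) + 1) ((t.length : Int) + 1)).foldl (fun cu j =>
          if c = PySem.List.pyGetD t (j - 1) ' ' then
            PySem.List.pySetD cu j (PySem.List.pyGetD prev (j - 1) 0 + 1)
          else
            PySem.List.pySetD cu j (max (PySem.List.pyGetD prev j 0) (PySem.List.pyGetD cu (j - 1) 0)))
        (done ++ rest)
      = done ++ pvRowStep c trem (prev.drop p) last := by
  intro trem
  induction trem generalizing prev with
  | nil =>
      intro p done rest last ht hdone hrest hlast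
      have hp : t.length ≤ p := by
        have := congrArg List.length ht; simp at this; omega
      have : rest = [] := by
        have : rest.length = 0 := by omega
        exact List.length_eq_zero_iff.mp this
      subst this
      rw [PySem.List.pyRange_one_eq_nil (by omega)]
      simp [pvRowStep]
  | cons d trem' ih =>
      intro p done rest last ht hdone hrest hlast
      have hp : p < t.length := by
        by_contra h
        rw [List.drop_eq_nil_of_le (by omega)] at ht
        exact List.cons_ne_nil d trem' ht.symm
      have htp : t.getD p ' ' = d := by
        rw [pv_getD_headD_drop, ht]; rfl
      obtain ⟨r0, rest', hr⟩ : ∃ r0 rest', rest = r0 :: rest' := by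
        cases rest with
        | nil => exfalso; simp at hrest; omega
        | cons a b => exact ⟨a, b, rfl⟩
      subst hr
      rw [PySem.List.pyRange_one_cons (by omega), List.foldl_cons]
      have e1 : ((p : Int) + 1 - 1) = ((p : Nat) : Int) := by omega
      have e2 : ((p : Int) + 1) = (((p + 1 : Nat)) : Int) := by push_cast; omega
      rw [e1, e2, PySem.List.pyGetD_natCast, PySem.List.pyGetD_natCast, PySem.List.pyGetD_natCast,
        PySem.List.pyGetD_natCast, htp]
      rw [List.getD_append _ _ _ _ (by omega), hlast]
      set v : Int := if c = d then prev.getD p 0 + 1 else max (prev.getD (p + 1) 0) last with hv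
      have hset : ∀ (w : Int),
          PySem.List.pySetD (done ++ r0 :: rest') (((p + 1 : Nat) : Int)) w = (done ++ [w]) ++ rest' := by
        intro w
        rw [PySem.List.pySetD_natCast, List.set_append, if_neg (by omega)]
        have h0 : p + 1 - done.length = 0 := by omega
        rw [h0]
        simp
      rw [show (if c = d then PySem.List.pySetD (done ++ r0 :: rest') (((p + 1 : Nat) : Int)) (prev.getD p 0 + 1)
             else PySem.List.pySetD (done ++ r0 :: rest') (((p + 1 : Nat) : Int)) (max (prev.getD (p+1) 0) last))
           = (done ++ [v]) ++ rest' from by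
        by_cases hcd : c = d <;> simp only [hcd, if_true, if_false, hv, hset]]
      have ih' := ih prev (p + 1) (done ++ [v]) rest' v
        (by rw [← List.tail_drop, ht]; rfl)
        (by simp [hdone])
        (by simp at hrest ⊢; omega)
        (by rw [List.getD_append_right _ _ _ _ (by omega), hdone]; simp)
      rw [ih']
      have hvv : v = (if c = d then (prev.drop p).headD 0 + 1 else max ((prev.drop p).tail.headD 0) last) := by
        rw [hv, pv_getD_headD_drop, pv_getD_headD_drop, List.tail_drop]
      rw [pvRowStep, List.tail_drop]
      have hv' : v = if c = d then prev[p]?.getD 0 + 1 else max (prev[p + 1]?.getD 0) last := by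
        rw [hv]; simp [List.getD_eq_getElem?_getD]
      simp [List.append_assoc, ← hv']

theorem pv_rowstep_length (c : Char) : ∀ (t : List Char) (row : List Int) (last : Int),
    (pvRowStep c t row last).length = t.length := by
  intro t
  induction t with
  | nil => intro row last; rfl
  | cons d t' ih => intro row last; simp [pvRowStep, ih]

theorem pv_inner_full (c : Char) (t : List Char) (prev curr : List Int)
    (h1 : curr.length = t.length + 1) (h0 : curr.headD 0 = 0) :
    (PySem.List.pyRange 1 ((t.length : Int) + 1)).foldl (fun cu j =>
        if c = PySem.List.pyGetD t (j - 1) ' ' then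
          PySem.List.pySetD cu j (PySem.List.pyGetD prev (j - 1) 0 + 1)
        else
          PySem.List.pySetD cu j (max (PySem.List.pyGetD prev j 0) (PySem.List.pyGetD cu (j - 1) 0)))
      curr
    = 0 :: pvRowStep c t prev 0 := by
  obtain ⟨c0, cr, rfl⟩ : ∃ c0 cr, curr = c0 :: cr := by
    cases curr with
    | nil => simp at h1
    | cons a b => exact ⟨a, b, rfl⟩
  have hc0 : c0 = 0 := by simpa using h0
  subst hc0
  have := pv_inner c t prev t 0 [0] cr 0 (by simp) (by simp) (by simp at h1 ⊢; omega) (by simp)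
  simpa using this

theorem pv_outer (t : List Char) : ∀ (s : List Char) (prev curr : List Int),
    prev.length = t.length + 1 → prev.headD 0 = 0 →
    curr.length = t.length + 1 → curr.headD 0 = 0 →
    (s.foldl (fun (pc : List Int × List Int) c =>
        ((PySem.List.pyRange 1 ((t.length : Int) + 1)).foldl (fun cu j =>
            if c = PySem.List.pyGetD t (j - 1) ' ' then
              PySem.List.pySetD cu j (PySem.List.pyGetD pc.1 (j - 1) 0 + 1)
            else
              PySem.List.pySetD cu j (max (PySem.List.pyGetD pc.1 j 0) (PySem.List.pyGetD cu (j - 1) 0)))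
          pc.2, pc.1)) (prev, curr)).1
    = s.foldl (fun row c => 0 :: pvRowStep c t row 0) prev := by
  intro s
  induction s with
  | nil => intro prev curr _ _ _ _; rfl
  | cons c s' ih =>
      intro prev curr hpl hph hcl hch
      rw [List.foldl_cons, List.foldl_cons, pv_inner_full c t prev curr hcl hch]
      exact ih (0 :: pvRowStep c t prev 0) prev (by simp [pv_rowstep_length]) (by simp) hpl hph

theorem pv_rows_length (t : List Char) : ∀ (s : List Char) (row : List Int),
    row.length = t.length + 1 → (s.foldl (fun row c => 0 :: pvRowStep c t row 0) row).length = t.length + 1 := by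
  intro s
  induction s with
  | nil => intro row h; exact h
  | cons c s' ih => intro row h; rw [List.foldl_cons]; exact ih _ (by simp [pv_rowstep_length])

theorem pv_pyGetD_last (row : List Int) (m : Nat) (h : row.length = m + 1) :
    PySem.List.pyGetD row ((m : Int)) 0 = PySem.List.pyGetD row (-1) 0 := by
  rw [PySem.List.pyGetD_natCast]
  simp [PySem.List.pyGetD, PySem.List.pyGet?, PySem.List.pyIdx?, h]

theorem pv_lcs_eq (s t : List Char) : pvEditDistA s t = pvLcs s t := by
  unfold pvEditDistA pvLcs
  simp only []
  rw [pv_foldl_shift s ' '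
    (fun pc c => ((PySem.List.pyRange 1 ((t.length : Int) + 1)).foldl (fun cu j =>
        if c = PySem.List.pyGetD t (j - 1) ' ' then
          PySem.List.pySetD cu j (PySem.List.pyGetD pc.1 (j - 1) 0 + 1)
        else
          PySem.List.pySetD cu j (max (PySem.List.pyGetD pc.1 j 0) (PySem.List.pyGetD cu (j - 1) 0)))
      pc.2, pc.1))
    (List.replicate (t.length + 1) (0:Int), List.replicate (t.length + 1) (0:Int))]
  rw [pv_outer t s _ _ (by simp) (by simp [List.replicate_succ]) (by simp) (by simp [List.replicate_succ])]
  exact pv_pyGetD_last _ t.length (pv_rows_length t s _ (by simp))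

-- ===== the row fold computes pvL =====

theorem pvL_zero_left (s t : List Char) (j : Nat) : pvL s t 0 j = 0 := by
  rw [pvL]

theorem pvL_zero_right (s t : List Char) (i : Nat) : pvL s t i 0 = 0 := by
  cases i with
  | zero => rw [pvL]
  | succ i => rw [pvL]

theorem pvL_succ_succ (s t : List Char) (i j : Nat) :
    pvL s t (i + 1) (j + 1) =
      if s.getD i ' ' = t.getD j ' ' then pvL s t i j + 1
      else max (pvL s t i (j + 1)) (pvL s t (i + 1) j) := by
  rw [pvL]

theorem pv_rowstep_spec (s t : List Char) (i : Nat) :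
    ∀ (tl : List Char) (j : Nat), t.drop j = tl →
      pvRowStep (s.getD i ' ') tl ((List.range' j (t.length + 1 - j)).map (fun k => pvL s t i k))
          (pvL s t (i + 1) j)
        = (List.range' (j + 1) (t.length - j)).map (fun k => pvL s t (i + 1) k) := by
  intro tl
  induction tl with
  | nil =>
      intro j ht
      have hj : t.length ≤ j := by
        have := congrArg List.length ht; simp at this; omega
      have h1 : t.length - j = 0 := by omega
      rw [h1]
      rfl
  | cons d tl' ih =>
      intro j ht
      have hj : j < t.length := by
        by_contra h
        rw [List.drop_eq_nil_of_le (by omega)] at ht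
        exact List.cons_ne_nil d tl' ht.symm
      have htj : t.getD j ' ' = d := by
        rw [pv_getD_headD_drop, ht]; rfl
      have htl : t.drop (j + 1) = tl' := by
        rw [← List.tail_drop, ht]; rfl
      have ih' := ih (j + 1) htl
      rw [show t.length + 1 - (j + 1) = t.length - j from by omega] at ih'
      rw [show t.length + 1 - j = (t.length - j) + 1 from by omega, List.range'_succ, List.map_cons,
        pvRowStep]
      simp only [List.headD_cons, List.tail_cons]
      have hhead : ((List.range' (j + 1) (t.length - j)).map (fun k => pvL s t i k)).headD 0
          = pvL s t i (j + 1) := by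
        rw [show t.length - j = (t.length - (j + 1)) + 1 from by omega, List.range'_succ,
          List.map_cons]
        rfl
      rw [hhead]
      rw [show (if s.getD i ' ' = d then pvL s t i j + 1
            else max (pvL s t i (j + 1)) (pvL s t (i + 1) j)) = pvL s t (i + 1) (j + 1) from by
        rw [pvL_succ_succ, htj]]
      rw [ih']
      conv_rhs => rw [show t.length - j = (t.length - (j + 1)) + 1 from by omega,
        List.range'_succ, List.map_cons]

theorem pv_rows_spec (s t : List Char) : ∀ (l : List Char) (i : Nat), i ≤ s.length → s.drop i = l →
    l.foldl (fun row c => 0 :: pvRowStep c t row 0) ((List.range (t.length + 1)).map (fun k => pvL s t i k))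
      = (List.range (t.length + 1)).map (fun k => pvL s t s.length k) := by
  intro l
  induction l with
  | nil =>
      intro i hi ht
      have : s.length ≤ i := by
        have := congrArg List.length ht; simp at this; omega
      have : i = s.length := by omega
      subst this
      rfl
  | cons c l' ih =>
      intro i hi ht
      have hi' : i < s.length := by
        by_contra h
        rw [List.drop_eq_nil_of_le (by omega)] at ht
        exact List.cons_ne_nil c l' ht.symm
      have hsc : s.getD i ' ' = c := by
        rw [pv_getD_headD_drop, ht]; rfl
      rw [List.foldl_cons]
      have hstep : (0 :: pvRowStep c t ((List.range (t.length + 1)).map (fun k => pvL s t i k)) 0)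
          = (List.range (t.length + 1)).map (fun k => pvL s t (i + 1) k) := by
        have h := pv_rowstep_spec s t i t 0 (by simp)
        simp only [Nat.sub_zero, Nat.zero_add] at h
        rw [List.range_eq_range', ← hsc,
          show (0 : Int) = pvL s t (i + 1) 0 from (pvL_zero_right s t (i + 1)).symm, h,
          List.range'_succ, List.map_cons]
      rw [hstep]
      exact ih (i + 1) (by omega) (by rw [← List.tail_drop, ht]; rfl)

theorem pv_lcs_eq_pvL (s t : List Char) : pvLcs s t = pvL s t s.length t.length := by
  unfold pvLcs
  have hinit : List.replicate (t.length + 1) (0 : Int)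
      = (List.range (t.length + 1)).map (fun k => pvL s t 0 k) := by
    rw [show (fun k => pvL s t 0 k) = (fun _ => (0 : Int)) from funext (pvL_zero_left s t)]
    rw [List.map_const', List.length_range]
  rw [hinit, pv_rows_spec s t s 0 (by omega) rfl]
  rw [← pv_pyGetD_last _ t.length (by simp)]
  rw [PySem.List.pyGetD_natCast]
  rw [List.getD_eq_getElem?_getD]
  simp

-- ===== memoized recursion computes pvL =====

def pvInv (s t : List Char) (m : PySem.Dict (Int × Int) Int) : Prop :=
  ∀ (i j : Nat) (v : Int), m.get? (((i : Nat) : Int), ((j : Nat) : Int)) = some v → v = pvL s t i j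

theorem pvInv_empty (s t : List Char) : pvInv s t PySem.Dict.empty := by
  intro i j v h
  rw [PySem.Dict.get?_empty] at h
  exact absurd h (by simp)

theorem pvInv_insert (s t : List Char) (m : PySem.Dict (Int × Int) Int) (hm : pvInv s t m)
    (a b : Nat) : pvInv s t (m.insert (((a : Nat) : Int), ((b : Nat) : Int)) (pvL s t a b)) := by
  intro i j v h
  rw [PySem.Dict.get?_insert] at h
  by_cases he : (((i : Nat) : Int), ((j : Nat) : Int)) = (((a : Nat) : Int), ((b : Nat) : Int))
  · rw [if_pos he] at h
    have hia : i = a := by have := congrArg Prod.fst he; simpa using this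
    have hjb : j = b := by have := congrArg Prod.snd he; simpa using this
    subst hia; subst hjb
    injection h with h'
    exact h'.symm
  · rw [if_neg he] at h
    exact hm i j v h

theorem pvGo_spec (s t : List Char) : ∀ (N i j : Nat), i + j ≤ N →
    ∀ (memo : PySem.Dict (Int × Int) Int), pvInv s t memo →
      (pvGo s t i j memo).1 = pvL s t i j ∧ pvInv s t (pvGo s t i j memo).2 := by
  intro N
  induction N with
  | zero =>
      intro i j hij memo hm
      have hi : i = 0 := by omega
      subst hi
      rw [pvGo]
      exact ⟨(pvL_zero_left s t j).symm, hm⟩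
  | succ N ihN =>
      intro i j hij memo hm
      cases i with
      | zero =>
          rw [pvGo]
          exact ⟨(pvL_zero_left s t j).symm, hm⟩
      | succ i =>
          cases j with
          | zero =>
              rw [pvGo]
              exact ⟨(pvL_zero_right s t (i + 1)).symm, hm⟩
          | succ j =>
              rw [pvGo]
              simp only []
              cases hget : PySem.Dict.get? memo (((i + 1 : Nat) : Int), ((j + 1 : Nat) : Int)) with
              | some v =>
                  exact ⟨hm (i + 1) (j + 1) v hget, hm⟩
              | none =>
                  by_cases hc : PySem.List.pyGetD s ((i : Nat) : Int) ' ' = PySem.List.pyGetD t ((j : Nat) : Int) ' '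
                  · rw [if_pos hc]
                    obtain ⟨h1, h2⟩ := ihN i j (by omega) memo hm
                    have hcc : s.getD i ' ' = t.getD j ' ' := by
                      rwa [PySem.List.pyGetD_natCast, PySem.List.pyGetD_natCast] at hc
                    have hval : (pvGo s t i j memo).1 + 1 = pvL s t (i + 1) (j + 1) := by
                      rw [h1, pvL_succ_succ, if_pos hcc]
                    refine ⟨hval, ?_⟩
                    rw [hval]
                    exact pvInv_insert s t _ h2 (i + 1) (j + 1)
                  · rw [if_neg hc]
                    obtain ⟨h1, h2⟩ := ihN i (j + 1) (by omega) memo hm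
                    obtain ⟨h3, h4⟩ := ihN (i + 1) j (by omega) _ h2
                    have hcc : ¬ s.getD i ' ' = t.getD j ' ' := by
                      rwa [PySem.List.pyGetD_natCast, PySem.List.pyGetD_natCast] at hc
                    have hval : max (pvGo s t i (j + 1) memo).1 (pvGo s t (i + 1) j (pvGo s t i (j + 1) memo).2).1
                        = pvL s t (i + 1) (j + 1) := by
                      rw [h1, h3, pvL_succ_succ, if_neg hcc]
                    refine ⟨hval, ?_⟩
                    rw [hval]
                    exact pvInv_insert s t _ h4 (i + 1) (j + 1)

theorem pv_memo_eq_pvL (s t : List Char) : pvLcsMemo s t = pvL s t s.length t.length :=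
  (pvGo_spec s t (s.length + t.length) s.length t.length (by omega) PySem.Dict.empty (pvInv_empty s t)).1

theorem pv_edit_eq_memo (s t : List Char) : pvEditDistA s t = pvLcsMemo s t := by
  rw [pv_lcs_eq, pv_lcs_eq_pvL, pv_memo_eq_pvL]

-- ===== outer loop: A's variant list vs B's windows of the doubled lists =====

def pvRot (k : Nat) (l : List Char) : List Char := l.drop k ++ l.take k

theorem pv_variationsA_eq (a : List Char) :
    pvVariationsA a = (List.range a.length).flatMap (fun k => [pvRot k a, (pvRot k a).reverse]) := by
  unfold pvVariationsA
  rw [PySem.List.pyRange_zero_nat, List.foldl_map]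
  rw [PySem.List.foldl_congr_mem _ _
    (fun acc k => acc ++ [pvRot k a, (pvRot k a).reverse]) [] ?_]
  · rw [PySem.List.foldl_append_eq_flatMap
      (fun k => [pvRot k a, (pvRot k a).reverse]) (List.range a.length) []]
    simp
  · intro acc k _
    simp only [PySem.List.slice_from_natCast, PySem.List.slice_to_natCast,
      PySem.List.slice?_none_none_neg_one, Option.getD_some, pvRot, List.append_assoc]
    rfl

theorem pv_double_slice (l : List Char) (k : Nat) (hk : k ≤ l.length) :
    ((l ++ l).drop k).take l.length = pvRot k l := by
  rw [List.drop_append_of_le_length hk]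
  have h : l.length = (l.drop k).length + k := by simp; omega
  rw [h, List.take_append]
  unfold pvRot
  have h2 : (List.drop k l).length + k - (List.drop k l).length = k := by omega
  rw [h2, List.take_of_length_le (by omega)]

theorem pv_rot_rev (a : List Char) (k : Nat) (hk : k < a.length) :
    (pvRot k a).reverse = pvRot ((a.length - k) % a.length) a.reverse := by
  rcases Nat.eq_zero_or_pos k with rfl | hkpos
  · simp [pvRot, Nat.mod_self]
  · have hσ : (a.length - k) % a.length = a.length - k := Nat.mod_eq_of_lt (by omega)
    rw [hσ]
    unfold pvRot
    rw [List.reverse_append, List.reverse_take, List.reverse_drop]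

theorem pv_map_sigma (n : Nat) (hn : 0 < n) :
    (List.range n).map (fun k => (n - k) % n) = 0 :: (List.range' 1 (n - 1)).reverse := by
  apply List.ext_getElem
  · simp; omega
  · intro i h1 h2
    simp only [List.getElem_map, List.getElem_range]
    rcases Nat.eq_zero_or_pos i with rfl | hi
    · simp [Nat.mod_self]
    · have hi' : i < n := by simpa using h1
      obtain ⟨j, rfl⟩ : ∃ j, i = j + 1 := ⟨i - 1, by omega⟩
      rw [List.getElem_cons_succ, List.getElem_reverse, List.getElem_range']
      have hlen : (List.range' 1 (n - 1)).length = n - 1 := by simp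
      rw [Nat.mod_eq_of_lt (by omega)]
      simp only [hlen]
      omega

theorem pv_perm_pairs {α β : Type} (f g : α → β) (l : List α) :
    (l.flatMap fun k => [f k, g k]).Perm (l.map f ++ l.map g) := by
  induction l with
  | nil => simp
  | cons x xs ih =>
      simp only [List.flatMap_cons, List.map_cons, List.cons_append]
      exact (List.Perm.cons (f x) ((List.Perm.cons (g x) ih).trans List.perm_middle.symm))

theorem pv_fold_pairs (f g : Nat → Int) (l : List Nat) (init : Int) :
    l.foldl (fun m k => max (max m (f k)) (g k)) init
      = (l.flatMap fun k => [f k, g k]).foldl max init := by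
  induction l generalizing init with
  | nil => rfl
  | cons x xs ih => simp only [List.foldl_cons, List.flatMap_cons, List.foldl_append]; exact ih _

theorem pv_perm_sigma (n : Nat) : (((List.range n).map (fun k => (n - k) % n))).Perm (List.range n) := by
  rcases Nat.eq_zero_or_pos n with rfl | hn
  · simp
  · rw [pv_map_sigma n hn]
    have hr : List.range n = 0 :: List.range' 1 (n - 1) := by
      rw [List.range_eq_range', show n = (n - 1) + 1 from by omega, List.range'_succ]
      norm_num
    rw [hr]
    exact List.Perm.cons 0 (List.reverse_perm _)

theorem pv_foldl_max_perm (l1 l2 : List Int) (h : l1.Perm l2) (init : Int) :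
    l1.foldl max init = l2.foldl max init := by
  haveI : RightCommutative (max : Int → Int → Int) := ⟨fun b a₁ a₂ => max_right_comm b a₁ a₂⟩
  exact h.foldl_eq init

theorem pv_main_eq (a b : List Char) :
    (pvVariationsA a).foldl (fun m v => max m (pvEditDistA v b)) 0
      = (PySem.List.pyRange 0 (a.length : Int)).foldl (fun best i =>
          max (max best (pvLcsMemo (PySem.List.slice (a ++ a) (some i) (some (i + (a.length : Int)))) b))
              (pvLcsMemo (PySem.List.slice (a.reverse ++ a.reverse) (some i) (some (i + (a.length : Int)))) b)) 0 := by
  rw [pv_variationsA_eq]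
  rw [show (fun (m : Int) v => max m (pvEditDistA v b)) = fun m v => max m (pvLcsMemo v b) from by
    funext m v; rw [pv_edit_eq_memo]]
  rw [← List.foldl_map (f := fun v => pvLcsMemo v b) (g := max)]
  rw [List.map_flatMap]
  rw [PySem.List.pyRange_zero_nat, List.foldl_map]
  rw [PySem.List.foldl_congr_mem _ _
    (fun best k => max (max best (pvLcsMemo (pvRot k a) b)) (pvLcsMemo (pvRot k a.reverse) b)) 0 ?_]
  · rw [pv_fold_pairs (fun k => pvLcsMemo (pvRot k a) b) (fun k => pvLcsMemo (pvRot k a.reverse) b)]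
    apply pv_foldl_max_perm
    refine List.Perm.trans ?_ (pv_perm_pairs (fun k => pvLcsMemo (pvRot k a) b) (fun k => pvLcsMemo (pvRot k a.reverse) b) (List.range a.length)).symm
    refine (pv_perm_pairs _ _ _).trans ?_
    apply List.Perm.append_left
    have e1 : (List.range a.length).map (fun k => pvLcsMemo ((pvRot k a).reverse) b)
        = (List.range a.length).map (fun k => pvLcsMemo (pvRot ((a.length - k) % a.length) a.reverse) b) := by
      apply List.map_congr_left
      intro k hk
      rw [pv_rot_rev a k (List.mem_range.mp hk)]
    rw [e1, show (fun k => pvLcsMemo (pvRot ((a.length - k) % a.length) a.reverse) b)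
        = (fun j => pvLcsMemo (pvRot j a.reverse) b) ∘ (fun k => (a.length - k) % a.length) from rfl,
      ← List.map_map]
    exact (pv_perm_sigma a.length).map _
  · intro best k hk
    have hk' : k < a.length := List.mem_range.mp hk
    rw [PySem.List.slice_natCast_add, PySem.List.slice_natCast_add]
    rw [pv_double_slice a k (by omega)]
    have h2 : ((a.reverse ++ a.reverse).drop k).take a.length = pvRot k a.reverse := by
      rw [show a.length = a.reverse.length from by simp]
      exact pv_double_slice a.reverse k (by simp; omega)
    rw [h2]

theorem pv_isIn_singleton (c : Char) (l : List Char) : PySem.Chars.isIn [c] l = l.contains c := by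
  apply Bool.eq_iff_iff.mpr
  simp [PySem.Chars.isIn_iff_infix, List.singleton_infix_iff]

theorem pv_contains_inter (s1 s2 : List Char) (c : Char) :
    PySem.Set.contains (PySem.Set.inter (PySem.Set.ofList s1) (PySem.Set.ofList s2)) c
      = (s1.contains c && s2.contains c) := by
  apply Bool.eq_iff_iff.mpr
  simp [PySem.Set.contains, PySem.Set.mem_inter, PySem.Set.mem_ofList]

-- ===== VERDICT (by name: the statement is the Claim_ definition above) =====
theorem solve_bracelet_case_spec : Claim_equal_solve_bracelet_case := by
  intro s1 s2 _
  unfold Spec_solve_bracelet_case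
  show solve_bracelet_case s1 s2 = solve_bracelet_case_alt s1 s2
  unfold solve_bracelet_case solve_bracelet_case_alt
  simp only [PySem.List.slice?_none_none_neg_one, Option.getD_some]
  have hf1 : s1.toList.filter (fun c => PySem.Chars.isIn [c] s2.toList)
      = s1.toList.filter (fun c =>
          PySem.Set.contains (PySem.Set.inter (PySem.Set.ofList s1.toList) (PySem.Set.ofList s2.toList)) c) := by
    apply List.filter_congr
    intro c hc
    rw [pv_isIn_singleton, pv_contains_inter]
    have : s1.toList.contains c = true := by simpa [List.contains_iff_mem] using hc
    rw [this, Bool.true_and]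
  have hf2 : s2.toList.filter (fun c => PySem.Chars.isIn [c] s1.toList)
      = s2.toList.filter (fun c =>
          PySem.Set.contains (PySem.Set.inter (PySem.Set.ofList s1.toList) (PySem.Set.ofList s2.toList)) c) := by
    apply List.filter_congr
    intro c hc
    rw [pv_isIn_singleton, pv_contains_inter]
    have : s2.toList.contains c = true := by simpa [List.contains_iff_mem] using hc
    rw [this, Bool.and_true]
  rw [hf1, hf2]
  by_cases hc : PySem.Set.inter (PySem.Set.ofList s1.toList) (PySem.Set.ofList s2.toList) = ([] : List Char)
  · rw [if_pos hc, hc]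
    simp [PySem.Set.contains]
  · rw [if_neg hc]
    split_ifs with h h2
    · rfl
    · rw [pv_main_eq]
    · rw [pv_main_eq]
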